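-- pv_equiv track=rewrite | github.com/MrBrantCode/unitest_baseline | mut_generate/mist_train_cf/cf_28343/solution.py | aggregate_statistics
-- ===== SOURCE A (Python) =====
-- from typing import List, Dict, Union
--
-- def aggregate_statistics(data: List[Dict[str, Union[str, Dict[str, int]]]], aggregation: str) -> Dict[str, int]:
--     aggregated_result = {}
--     count = {}
--
--     for source_data in data:
--         for source_id, stats in source_data.items():
--             for stat_key, stat_value in stats.items():
--                 if stat_key in aggregated_result:
--                     if aggregation == "SUM":
--                         aggregated_result[stat_key] += stat_value
--                     elif aggregation == "AVERAGE":
--                         aggregated_result[stat_key] += stat_value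
--                         count[stat_key] = count.get(stat_key, 0) + 1
--                     elif aggregation == "MAX":
--                         aggregated_result[stat_key] = max(aggregated_result[stat_key], stat_value)
--                     elif aggregation == "MIN":
--                         aggregated_result[stat_key] = min(aggregated_result[stat_key], stat_value)
--                 else:
--                     aggregated_result[stat_key] = stat_value
--                     if aggregation == "AVERAGE":
--                         count[stat_key] = 1
--
--     if aggregation == "AVERAGE":
--         for key in aggregated_result:
--             aggregated_result[key] //= count[key]
--
--     return aggregated_result
-- ===== SOURCE B (Python) =====
-- def aggregate_statistics(data, aggregation):
--     groups = {}
--     for source_data in data: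
--         for source_id, stats in source_data.items():
--             for stat_key, stat_value in stats.items():
--                 groups.setdefault(stat_key, []).append(stat_value)
--
--     def reduce(vals):
--         if aggregation == "SUM":
--             return sum(vals)
--         if aggregation == "AVERAGE":
--             return sum(vals) // len(vals)
--         if aggregation == "MAX":
--             return max(vals)
--         if aggregation == "MIN":
--             return min(vals)
--         return vals[0]
--
--     return {k: reduce(vals) for k, vals in groups.items()}
-- ===== Notes on version B (the rewrite author's own statement) =====
-- stated objective: alternative
-- what changed: A aggregates on-line, keeping a running value per key plus a separate count dict and a final division pass for AVERAGE; B first groups all values per key (first-seen key order) and then computes each key's result in one reduction (sum, sum//len, max, min, or first value for an unrecognized aggregation).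
import Mathlib
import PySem

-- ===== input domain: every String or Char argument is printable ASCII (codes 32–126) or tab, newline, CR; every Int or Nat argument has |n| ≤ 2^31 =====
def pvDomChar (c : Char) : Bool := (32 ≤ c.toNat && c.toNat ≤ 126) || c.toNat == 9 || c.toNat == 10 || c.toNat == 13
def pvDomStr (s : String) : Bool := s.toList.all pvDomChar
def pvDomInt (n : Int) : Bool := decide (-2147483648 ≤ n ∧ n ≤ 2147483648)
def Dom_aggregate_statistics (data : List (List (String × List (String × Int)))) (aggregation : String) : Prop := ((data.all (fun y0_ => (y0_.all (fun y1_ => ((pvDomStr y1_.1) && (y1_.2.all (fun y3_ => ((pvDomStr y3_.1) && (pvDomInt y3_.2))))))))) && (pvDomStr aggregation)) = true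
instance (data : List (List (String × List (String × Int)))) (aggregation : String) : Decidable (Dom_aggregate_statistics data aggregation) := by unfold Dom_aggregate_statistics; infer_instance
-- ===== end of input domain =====

-- ===== PORT A =====
-- B replaces A's on-line aggregation (running value + count dicts) by group-then-reduce; same results, alternative decomposition.
def pvAStep (aggregation : String) (st : PySem.Dict String Int × PySem.Dict String Int)
    (p : String × Int) : PySem.Dict String Int × PySem.Dict String Int :=
  if st.1.contains p.1 then
    if aggregation == "SUM" then (st.1.insert p.1 (st.1.getD p.1 0 + p.2), st.2)
    else if aggregation == "AVERAGE" then
      (st.1.insert p.1 (st.1.getD p.1 0 + p.2), st.2.insert p.1 (st.2.getD p.1 0 + 1))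
    else if aggregation == "MAX" then (st.1.insert p.1 (max (st.1.getD p.1 0) p.2), st.2)
    else if aggregation == "MIN" then (st.1.insert p.1 (min (st.1.getD p.1 0) p.2), st.2)
    else st
  else
    (st.1.insert p.1 p.2, if aggregation == "AVERAGE" then st.2.insert p.1 1 else st.2)

def aggregate_statistics (data : List (List (String × List (String × Int)))) (aggregation : String) : List (String × Int) :=
  let st := data.foldl (fun st source_data =>
      source_data.foldl (fun st kv => kv.2.foldl (pvAStep aggregation) st) st)
    (PySem.Dict.empty, PySem.Dict.empty)
  -- final pass: for key in aggregated_result: aggregated_result[key] //= count[key]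
  -- (count[key] always exists here; getD 1 is only a totality guard)
  let res := if aggregation == "AVERAGE" then
      PySem.Dict.mk (st.1.items.map (fun q => (q.1, PySem.Int.floordiv q.2 (st.2.getD q.1 1))))
    else st.1
  res.items

-- ===== PORT B =====
def pvReduce (aggregation : String) (vals : List Int) : Int :=
  if aggregation == "SUM" then vals.sum
  else if aggregation == "AVERAGE" then PySem.Int.floordiv vals.sum (vals.length : Int)
  else if aggregation == "MAX" then (PySem.List.max? vals (fun y => y)).getD 0
  else if aggregation == "MIN" then (PySem.List.min? vals (fun y => y)).getD 0
  else (PySem.List.pyGet? vals 0).getD 0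
  -- vals is never [] when called; the .getD 0 are only totality guards

def aggregate_statistics_alt (data : List (List (String × List (String × Int)))) (aggregation : String) : List (String × Int) :=
  let groups := data.foldl (fun g source_data =>
      source_data.foldl (fun g kv =>
        kv.2.foldl (fun g p => g.modify p.1 [] (· ++ [p.2])) g) g)
    PySem.Dict.empty
  groups.items.map (fun q => (q.1, pvReduce aggregation q.2))

-- ===== PRECONDITION & SPEC =====
def Spec_aggregate_statistics (data : List (List (String × List (String × Int)))) (aggregation : String) (out : List (String × Int)) : Prop := out = aggregate_statistics_alt data aggregation
instance (data : List (List (String × List (String × Int)))) (aggregation : String) (out : List (String × Int)) : Decidable (Spec_aggregate_statistics data aggregation out) := by unfold Spec_aggregate_statistics; infer_instance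

-- ===== CLAIM (what is proved, stated in full; the proofs are below) =====
def Claim_equal_aggregate_statistics : Prop := ∀ (data : List (List (String × List (String × Int)))) (aggregation : String), Dom_aggregate_statistics data aggregation → Spec_aggregate_statistics data aggregation (aggregate_statistics data aggregation)

-- ===== LEMMAS AND PROOFS =====

-- ghost functions for the invariant: B's grouping step, and the value A's running
-- aggregate holds for a key whose collected values are `vals`
def pvGStep (g : PySem.Dict String (List Int)) (p : String × Int) : PySem.Dict String (List Int) :=
  g.modify p.1 [] (· ++ [p.2])

def pvPre (agg : String) (vals : List Int) : Int :=
  if agg == "AVERAGE" then vals.sum else pvReduce agg vals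

def pvToR (agg : String) (G : PySem.Dict String (List Int)) : PySem.Dict String Int :=
  PySem.Dict.mk (G.items.map fun q => (q.1, pvPre agg q.2))

def pvToC (agg : String) (G : PySem.Dict String (List Int)) : PySem.Dict String Int :=
  if agg == "AVERAGE" then PySem.Dict.mk (G.items.map fun q => (q.1, (q.2.length : Int)))
  else PySem.Dict.empty

lemma pvPre_singleton (agg : String) (v : Int) : pvPre agg [v] = v := by
  unfold pvPre pvReduce
  split_ifs <;>
    simp [PySem.List.max?_id_cons, PySem.List.min?_id_cons]

lemma pvMax_append (vals : List Int) (v : Int) (h : vals ≠ []) :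
    (PySem.List.max? (vals ++ [v]) (fun y => y)).getD 0
      = max ((PySem.List.max? vals (fun y => y)).getD 0) v := by
  cases vals with
  | nil => exact absurd rfl h
  | cons x t => simp [PySem.List.max?_id_cons, List.foldl_append]

lemma pvMin_append (vals : List Int) (v : Int) (h : vals ≠ []) :
    (PySem.List.min? (vals ++ [v]) (fun y => y)).getD 0
      = min ((PySem.List.min? vals (fun y => y)).getD 0) v := by
  cases vals with
  | nil => exact absurd rfl h
  | cons x t => simp [PySem.List.min?_id_cons, List.foldl_append]

-- how A's running value changes when one more value joins a nonempty group
lemma pvPre_append_sum (agg : String) (vals : List Int) (v : Int)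
    (h : agg == "SUM" ∨ agg == "AVERAGE") :
    pvPre agg (vals ++ [v]) = pvPre agg vals + v := by
  rcases h with h | h <;> rw [beq_iff_eq] at h <;> subst h <;>
    simp [pvPre, pvReduce]

lemma pvPre_append_max (vals : List Int) (v : Int) (h : vals ≠ []) :
    pvPre "MAX" (vals ++ [v]) = max (pvPre "MAX" vals) v := by
  simp [pvPre, pvReduce, pvMax_append vals v h]

lemma pvPre_append_min (vals : List Int) (v : Int) (h : vals ≠ []) :
    pvPre "MIN" (vals ++ [v]) = min (pvPre "MIN" vals) v := by
  simp [pvPre, pvReduce, pvMin_append vals v h]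

lemma pvPre_append_other (agg : String) (vals : List Int) (v : Int) (h : vals ≠ [])
    (h1 : agg ≠ "SUM") (h2 : agg ≠ "AVERAGE") (h3 : agg ≠ "MAX") (h4 : agg ≠ "MIN") :
    pvPre agg (vals ++ [v]) = pvPre agg vals := by
  cases vals with
  | nil => exact absurd rfl h
  | cons x t => simp [pvPre, pvReduce, h1, h2, h3, h4, PySem.List.pyGet?_zero_cons]

-- keys of the ghost dicts
lemma pvToR_keys (agg : String) (G : PySem.Dict String (List Int)) :
    (pvToR agg G).keys = G.keys := by
  simp [pvToR, PySem.Dict.keys, List.map_map, Function.comp]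

lemma pvToR_contains (agg : String) (G : PySem.Dict String (List Int)) (k : String) :
    (pvToR agg G).contains k = G.contains k := by
  rw [PySem.Dict.contains_eq_decide_mem_keys, PySem.Dict.contains_eq_decide_mem_keys, pvToR_keys]

-- inserting the image value into a mapped dict = mapping the updated items
lemma pvMk_insert_of_mem (l : List (String × List Int)) (f : List Int → Int) (k : String)
    (w : List Int) (hk : k ∈ l.map Prod.fst) :
    (PySem.Dict.mk (l.map fun q => (q.1, f q.2))).insert k (f w)
      = PySem.Dict.mk ((l.map fun q => if q.1 == k then (k, w) else q).map fun q => (q.1, f q.2)) := by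
  have hc : (PySem.Dict.mk (l.map fun q => (q.1, f q.2))).contains k = true := by
    rw [PySem.Dict.contains_eq_decide_mem_keys]
    simpa [PySem.Dict.keys, List.map_map, Function.comp] using hk
  apply PySem.Dict.ext
  rw [PySem.Dict.items_insert_of_contains _ _ hc]
  dsimp only
  simp only [List.map_map]
  apply List.map_congr_left
  intro q _
  by_cases h : q.1 = k <;> simp [Function.comp, h]

lemma pvMk_insert_of_not_mem (l : List (String × List Int)) (f : List Int → Int) (k : String)
    (w : List Int) (hk : k ∉ l.map Prod.fst) :
    (PySem.Dict.mk (l.map fun q => (q.1, f q.2))).insert k (f w)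
      = PySem.Dict.mk ((l ++ [(k, w)]).map fun q => (q.1, f q.2)) := by
  have hc : (PySem.Dict.mk (l.map fun q => (q.1, f q.2))).contains k = false := by
    rw [PySem.Dict.contains_eq_decide_mem_keys]
    simpa [PySem.Dict.keys, List.map_map, Function.comp] using hk
  apply PySem.Dict.ext
  rw [PySem.Dict.items_insert_of_not_contains _ _ hc]
  dsimp only
  simp

-- a value stored in a mapped dict, read back
lemma pvMk_getD_of_mem (l : List (String × List Int)) (f : List Int → Int) (k : String)
    (w : List Int) (d : Int) (hk : (k, w) ∈ l) (hnd : (l.map Prod.fst).Nodup) :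
    (PySem.Dict.mk (l.map fun q => (q.1, f q.2))).getD k d = f w := by
  have hm : (k, f w) ∈ (PySem.Dict.mk (l.map fun q => (q.1, f q.2))).items :=
    List.mem_map.2 ⟨(k, w), hk, rfl⟩
  have hnd' : (PySem.Dict.mk (l.map fun q => (q.1, f q.2))).keys.Nodup := by
    simpa [PySem.Dict.keys, List.map_map, Function.comp] using hnd
  exact PySem.Dict.getD_of_mem_items _ hm hnd' d

-- the items of pvToR/pvToC after an update whose running value does not change
lemma pvToR_insert_same (agg : String) (G : PySem.Dict String (List Int)) (k : String)
    (w : List Int) (v : Int) (h1 : G.keys.Nodup) (hc : G.contains k = true)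
    (hval : pvPre agg (w ++ [v]) = pvPre agg w) (hw : G.getD k [] = w) :
    pvToR agg (G.insert k (w ++ [v])) = pvToR agg G := by
  apply PySem.Dict.ext
  unfold pvToR
  dsimp only
  rw [PySem.Dict.items_insert_of_contains _ _ hc, List.map_map]
  apply List.map_congr_left
  intro q hq
  by_cases hqk : q.1 = k
  · have hq2 : q.2 = w := by
      have : G.getD k [] = q.2 := by
        have hq' : (k, q.2) ∈ G.items := by rw [← hqk]; exact hq
        exact PySem.Dict.getD_of_mem_items _ hq' h1 []
      rw [← this, hw]
    simp [Function.comp, hqk, hq2, hval]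
  · simp [Function.comp, hqk]

-- one step of A's loop matches one step of B's grouping, through the ghost maps
lemma pvStep (agg : String) (G : PySem.Dict String (List Int)) (p : String × Int)
    (h1 : G.keys.Nodup) (h2 : ∀ q ∈ G.items, q.2 ≠ []) :
    pvAStep agg (pvToR agg G, pvToC agg G) p = (pvToR agg (pvGStep G p), pvToC agg (pvGStep G p)) := by
  obtain ⟨k, v⟩ := p
  have hndf : (G.items.map Prod.fst).Nodup := by
    simpa [PySem.Dict.keys] using h1
  by_cases hc : G.contains k = true
  · -- the key is already present: A updates the running value, B appends to its group
    have hk : k ∈ G.keys := (PySem.Dict.contains_iff_mem_keys G k).1 hc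
    obtain ⟨w, hq⟩ : ∃ w, (k, w) ∈ G.items := by
      simpa [PySem.Dict.keys] using hk
    have hw : G.getD k [] = w := PySem.Dict.getD_of_mem_items _ hq h1 []
    have hwne : w ≠ [] := h2 _ hq
    have hkf : k ∈ G.items.map Prod.fst := List.mem_map.2 ⟨(k, w), hq, rfl⟩
    have hmod : pvGStep G (k, v) = G.insert k (w ++ [v]) := by
      simp only [pvGStep, PySem.Dict.modify, hw]
    have hRc : (pvToR agg G).contains k = true := by rw [pvToR_contains]; exact hc
    have hRget : (pvToR agg G).getD k 0 = pvPre agg w :=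
      pvMk_getD_of_mem G.items (pvPre agg) k w 0 hq hndf
    have hRins : ∀ u : List Int,
        pvToR agg (G.insert k u)
          = PySem.Dict.mk ((G.items.map fun q => if q.1 == k then (k, u) else q).map
              fun q => (q.1, pvPre agg q.2)) := by
      intro u
      unfold pvToR
      rw [PySem.Dict.items_insert_of_contains _ _ hc]
    by_cases hS : agg == "SUM"
    · have ha : agg = "SUM" := by rwa [beq_iff_eq] at hS
      subst ha
      simp only [pvAStep]
      rw [if_pos hRc, if_pos hS, hmod]
      refine Prod.ext ?_ ?_
      · dsimp only
        rw [hRget, ← pvPre_append_sum _ w v (Or.inl rfl), hRins]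
        simp only [pvToR]
        exact pvMk_insert_of_mem G.items (pvPre "SUM") k (w ++ [v]) hkf
      · simp [pvToC]
    by_cases hA : agg == "AVERAGE"
    · have ha : agg = "AVERAGE" := by rwa [beq_iff_eq] at hA
      subst ha
      have hCget : (pvToC "AVERAGE" G).getD k 0 = ((w.length : Int)) :=
        pvMk_getD_of_mem G.items (fun u => (u.length : Int)) k w 0 hq hndf
      simp only [pvAStep]
      rw [if_pos hRc, if_neg (by simpa using hS), if_pos hA, hmod]
      refine Prod.ext ?_ ?_
      · dsimp only
        rw [hRget, ← pvPre_append_sum _ w v (Or.inr rfl), hRins]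
        simp only [pvToR]
        exact pvMk_insert_of_mem G.items (pvPre "AVERAGE") k (w ++ [v]) hkf
      · dsimp only
        rw [hCget]
        have hlen : (w.length : Int) + 1 = (((w ++ [v]).length : Int)) := by simp
        rw [hlen]
        have h := pvMk_insert_of_mem G.items (fun u => ((u.length : Int))) k (w ++ [v]) hkf
        simp only [pvToC, if_pos (show (("AVERAGE" == "AVERAGE") = true) from rfl)]
        rw [PySem.Dict.items_insert_of_contains _ _ hc]
        exact h
    by_cases hM : agg == "MAX"
    · have ha : agg = "MAX" := by rwa [beq_iff_eq] at hM
      subst ha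
      simp only [pvAStep]
      rw [if_pos hRc, if_neg (by simpa using hS), if_neg (by simpa using hA), if_pos hM, hmod]
      refine Prod.ext ?_ ?_
      · dsimp only
        rw [hRget, ← pvPre_append_max w v hwne, hRins]
        simp only [pvToR]
        exact pvMk_insert_of_mem G.items (pvPre "MAX") k (w ++ [v]) hkf
      · simp [pvToC]
    by_cases hN : agg == "MIN"
    · have ha : agg = "MIN" := by rwa [beq_iff_eq] at hN
      subst ha
      simp only [pvAStep]
      rw [if_pos hRc, if_neg (by simpa using hS), if_neg (by simpa using hA),
        if_neg (by simpa using hM), if_pos hN, hmod]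
      refine Prod.ext ?_ ?_
      · dsimp only
        rw [hRget, ← pvPre_append_min w v hwne, hRins]
        simp only [pvToR]
        exact pvMk_insert_of_mem G.items (pvPre "MIN") k (w ++ [v]) hkf
      · simp [pvToC]
    · -- unrecognized aggregation: A leaves the state untouched; the group head is unchanged
      have hS' : agg ≠ "SUM" := by simpa using hS
      have hA' : agg ≠ "AVERAGE" := by simpa using hA
      have hM' : agg ≠ "MAX" := by simpa using hM
      have hN' : agg ≠ "MIN" := by simpa using hN
      simp only [pvAStep]
      rw [if_pos hRc, if_neg (by simpa using hS), if_neg (by simpa using hA),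
        if_neg (by simpa using hM), if_neg (by simpa using hN), hmod]
      refine Prod.ext ?_ ?_
      · exact (pvToR_insert_same agg G k w v h1 hc
          (pvPre_append_other agg w v hwne hS' hA' hM' hN') hw).symm
      · simp [pvToC, hA']
  · -- fresh key: A stores the value (and count 1 for AVERAGE); B starts the group [v]
    have hc' : G.contains k = false := by simpa using hc
    have hkf : k ∉ G.items.map Prod.fst := by
      intro hmem
      have : k ∈ G.keys := by simpa [PySem.Dict.keys] using hmem
      exact hc ((PySem.Dict.contains_iff_mem_keys G k).2 this)
    have hmod : pvGStep G (k, v) = G.insert k [v] := by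
      simp only [pvGStep, PySem.Dict.modify, PySem.Dict.getD_of_not_contains _ _ hc']
      rfl
    have hRc : (pvToR agg G).contains k = true → False := by
      rw [pvToR_contains, hc']; simp
    have hRc' : (pvToR agg G).contains k = false := by
      rw [pvToR_contains]; exact hc'
    have hRins : pvToR agg (G.insert k [v])
        = PySem.Dict.mk ((G.items ++ [(k, [v])]).map fun q => (q.1, pvPre agg q.2)) := by
      unfold pvToR
      rw [PySem.Dict.items_insert_of_not_contains _ _ hc']
    simp only [pvAStep]
    rw [if_neg (by simp [hRc']), hmod]
    refine Prod.ext ?_ ?_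
    · rw [hRins]
      have h := pvMk_insert_of_not_mem G.items (pvPre agg) k [v] hkf
      rw [pvPre_singleton] at h
      exact h
    · by_cases hA : agg == "AVERAGE"
      · have ha : agg = "AVERAGE" := by rwa [beq_iff_eq] at hA
        subst ha
        simp only [pvToC, hA, if_true]
        apply PySem.Dict.ext
        rw [PySem.Dict.items_insert_of_not_contains _ _ hc']
        have h := pvMk_insert_of_not_mem G.items (fun u => ((u.length : Int))) k [v] hkf
        simpa using congrArg PySem.Dict.items h
      · simp [pvToC, hA]

lemma pvGood (ps : List (String × Int)) (G : PySem.Dict String (List Int))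
    (h1 : G.keys.Nodup) (h2 : ∀ q ∈ G.items, q.2 ≠ []) :
    (ps.foldl pvGStep G).keys.Nodup ∧ ∀ q ∈ (ps.foldl pvGStep G).items, q.2 ≠ [] := by
  induction ps generalizing G with
  | nil => exact ⟨h1, h2⟩
  | cons p ps ih =>
    refine ih (G := pvGStep G p) ?_ ?_
    · exact PySem.Dict.nodup_keys_insert _ _ _ h1
    · intro q hq
      rcases (PySem.Dict.mem_items_insert _ _ _ _).1 hq with h | h
      · subst h; simp
      · exact h2 q h.1

lemma pvInv (agg : String) (ps : List (String × Int)) (G : PySem.Dict String (List Int))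
    (h1 : G.keys.Nodup) (h2 : ∀ q ∈ G.items, q.2 ≠ []) :
    ps.foldl (pvAStep agg) (pvToR agg G, pvToC agg G)
      = (pvToR agg (ps.foldl pvGStep G), pvToC agg (ps.foldl pvGStep G)) := by
  induction ps generalizing G with
  | nil => rfl
  | cons p ps ih =>
    rw [List.foldl_cons, List.foldl_cons, pvStep agg G p h1 h2]
    refine ih (G := pvGStep G p) ?_ ?_
    · exact PySem.Dict.nodup_keys_insert _ _ _ h1
    · intro q hq
      rcases (PySem.Dict.mem_items_insert _ _ _ _).1 hq with h | h
      · subst h; simp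
      · exact h2 q h.1

-- nested for-loops = one fold over the flattened pair list
lemma pvNest {β : Type} (f : β → (String × Int) → β) (init : β)
    (data : List (List (String × List (String × Int)))) :
    data.foldl (fun st source_data =>
        source_data.foldl (fun st kv => kv.2.foldl f st) st) init
      = (data.flatMap (fun sd => sd.flatMap (fun kv => kv.2))).foldl f init := by
  rw [List.foldl_flatMap]
  congr 1
  funext a sd
  rw [List.foldl_flatMap]

-- ===== VERDICT (by name: the statement is the Claim_ definition above) =====
theorem aggregate_statistics_spec : Claim_equal_aggregate_statistics := by
  intro data agg _
  unfold Spec_aggregate_statistics aggregate_statistics aggregate_statistics_alt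
  rw [pvNest, pvNest]
  set ps := data.flatMap (fun sd => sd.flatMap (fun kv => kv.2)) with hps
  have h0R : pvToR agg PySem.Dict.empty = PySem.Dict.empty := by
    apply PySem.Dict.ext; rfl
  have h0C : pvToC agg PySem.Dict.empty = PySem.Dict.empty := by
    apply PySem.Dict.ext; unfold pvToC; split <;> rfl
  have hinv := pvInv agg ps PySem.Dict.empty (by simp [PySem.Dict.keys, PySem.Dict.empty])
    (by simp [PySem.Dict.empty])
  rw [h0R, h0C] at hinv
  rw [hinv]
  have hgood := pvGood ps PySem.Dict.empty (by simp [PySem.Dict.keys, PySem.Dict.empty])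
    (by simp [PySem.Dict.empty])
  set Gf := ps.foldl pvGStep PySem.Dict.empty with hGf
  have hndf : (Gf.items.map Prod.fst).Nodup := by
    simpa [PySem.Dict.keys] using hgood.1
  by_cases hA : agg == "AVERAGE"
  · have ha : agg = "AVERAGE" := by rwa [beq_iff_eq] at hA
    subst ha
    simp only [hA, if_true, pvToR]
    simp only [List.map_map]
    apply List.map_congr_left
    intro q hq
    have hCget : (pvToC "AVERAGE" Gf).getD q.1 1 = ((q.2.length : Int)) :=
      pvMk_getD_of_mem Gf.items (fun u => ((u.length : Int))) q.1 q.2 1 hq hndf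
    simp [Function.comp, hCget, pvPre, pvReduce]
  · simp only [hA, Bool.false_eq_true, if_false, pvToR]
    apply List.map_congr_left
    intro q _
    simp [pvPre, hA]
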